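-- pv_equiv track=rewrite | github.com/yushengsheng/jiaoyisuopiliang | withdraw_account_ops.py | parse_address_lines
-- ===== SOURCE A (Python) =====
-- def parse_address_lines(lines: list[str]) -> list[str]:
--     arr: list[str] = []
--     seen: set[str] = set()
--     for i, line in enumerate(lines, start=1):
--         s = line.strip()
--         if not s or s.startswith("#"):
--             continue
--         if any(x.isspace() for x in s):
--             raise RuntimeError(f"第 {i} 行地址格式错误：地址中不能包含空白字符")
--         if s in seen:
--             continue
--         seen.add(s)
--         arr.append(s)
--     return arr
-- ===== SOURCE B (Python) =====
-- def parse_address_lines(lines: list[str]) -> list[str]: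
--     stripped = [line.strip() for line in lines]
--     for i, s in enumerate(stripped, start=1):
--         if s and not s.startswith("#") and any(x.isspace() for x in s):
--             raise RuntimeError(f"第 {i} 行地址格式错误：地址中不能包含空白字符")
--     tokens = [s for s in stripped if s and not s.startswith("#")]
--     return _dedup_first(tokens)
--
--
-- def _dedup_first(ts: list[str]) -> list[str]:
--     # keep the head, drop every later copy of it, repeat on what remains
--     out: list[str] = []
--     while ts:
--         head = ts[0]
--         out.append(head)
--         ts = [t for t in ts[1:] if t != head]
--     return out
-- ===== Notes on version B (the rewrite author's own statement) =====
-- stated objective: alternative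
-- what changed: A's single loop interleaves validation with dedup via a running `seen` set; B uses staged passes (strip-map, a validation-only scan raising the same error, a comprehension filter) and a set-free head-keep/filter-out dedup loop that repeatedly drops later copies of the current head.
import Mathlib
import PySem

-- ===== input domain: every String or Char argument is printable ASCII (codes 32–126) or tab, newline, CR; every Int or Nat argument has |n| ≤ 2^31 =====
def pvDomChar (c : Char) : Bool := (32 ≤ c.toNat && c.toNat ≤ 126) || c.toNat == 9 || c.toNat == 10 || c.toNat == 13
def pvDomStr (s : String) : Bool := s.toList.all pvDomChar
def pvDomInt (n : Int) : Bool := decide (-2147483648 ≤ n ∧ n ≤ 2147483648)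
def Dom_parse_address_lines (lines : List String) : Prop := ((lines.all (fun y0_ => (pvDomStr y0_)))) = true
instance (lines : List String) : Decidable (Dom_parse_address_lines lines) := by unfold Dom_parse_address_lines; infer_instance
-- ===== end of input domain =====

-- B replaces A's single validate+dedup loop (with its running `seen` set) by staged passes:
-- strip-map, a validation scan that only raises, a comprehension filter, and a set-free
-- head-keep/filter-out dedup loop; alternative decomposition, same behaviour, same exception.


-- ===== PORT A =====
-- A's loop body; the raise branch is modelled as leaving the state unchanged
-- (those inputs are excluded by Pre_parse_address_lines)
def pvStepA (st : List String × PySem.Set String) (line : String) :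
    List String × PySem.Set String :=
  if (PySem.Str.strip line).toList.isEmpty || PySem.Str.startswith (PySem.Str.strip line) "#" then st
  else if (PySem.Str.strip line).toList.any PySem.Str.isspace then st   -- Python: raise RuntimeError
  else if (st.2).contains (PySem.Str.strip line) then st
  else (st.1 ++ [PySem.Str.strip line], PySem.Set.add st.2 (PySem.Str.strip line))

def parse_address_lines (lines : List String) : List String :=
  (lines.foldl pvStepA ([], PySem.Set.empty)).1

-- ===== PORT B =====
-- the head-keep / filter-out-duplicates-of-head while loop of Source B's _dedup_first
def pvDedupFirst : List String → List String
  | [] => []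
  | h :: t => h :: pvDedupFirst (t.filter (fun x => x != h))
termination_by ts => ts.length
decreasing_by
  simpa using Nat.lt_succ_of_le (List.length_filter_le _ t)

def parse_address_lines_alt (lines : List String) : List String :=
  let stripped := lines.map PySem.Str.strip
  -- validation scan: raises on an offending line (excluded by Pre_), otherwise no effect
  let tokens := stripped.filter (fun s => !s.toList.isEmpty && !PySem.Str.startswith s "#")
  pvDedupFirst tokens

-- ===== PRECONDITION & SPEC =====
-- Pre_ excludes exactly the inputs where Python A (and B) raises RuntimeError: a non-blank,
-- non-comment line whose stripped text still contains a whitespace character.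
def Pre_parse_address_lines (lines : List String) : Prop :=
  (lines.all (fun line =>
    let s := PySem.Str.strip line
    s.toList.isEmpty || PySem.Str.startswith s "#" || !(s.toList.any PySem.Str.isspace))) = true
instance (lines : List String) : Decidable (Pre_parse_address_lines lines) := by
  unfold Pre_parse_address_lines; infer_instance

def pvWitness_parse_address_lines : List String :=
  ["addr1", "# comment", "", "addr1", "  addr2  "]

def Spec_parse_address_lines (lines : List String) (out : List String) : Prop := out = parse_address_lines_alt lines
instance (lines : List String) (out : List String) : Decidable (Spec_parse_address_lines lines out) := by unfold Spec_parse_address_lines; infer_instance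

-- ===== CLAIM (what is proved, stated in full; the proofs are below) =====
def Claim_equal_parse_address_lines : Prop := ∀ (lines : List String), Dom_parse_address_lines lines → Pre_parse_address_lines lines → Spec_parse_address_lines lines (parse_address_lines lines)

-- ===== LEMMAS AND PROOFS =====

-- proof-side collector: the stripped lines A's loop would append (ignoring dedup)
def pvCollStep (acc : List String) (line : String) : List String :=
  if (PySem.Str.strip line).toList.isEmpty || PySem.Str.startswith (PySem.Str.strip line) "#" then acc
  else if (PySem.Str.strip line).toList.any PySem.Str.isspace then acc
  else acc ++ [PySem.Str.strip line]

theorem pvCollStep_from (lines : List String) (acc : List String) :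
    lines.foldl pvCollStep acc = acc ++ lines.foldl pvCollStep [] := by
  induction lines generalizing acc with
  | nil => simp
  | cons line rest ih =>
    simp only [List.foldl_cons]
    rw [ih (pvCollStep acc line), ih (pvCollStep [] line)]
    unfold pvCollStep
    split_ifs <;> simp

-- A's loop, started with `seen` holding exactly the elements of `arr`, produces the
-- order-preserving set-fold of the collected tokens
theorem pvKey (lines : List String) (arr : List String) :
    (lines.foldl pvStepA (arr, arr)).1 =
      List.foldl PySem.Set.add arr (lines.foldl pvCollStep []) := by
  induction lines generalizing arr with
  | nil => simp
  | cons line rest ih =>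
    simp only [List.foldl_cons]
    rw [pvCollStep_from rest (pvCollStep [] line), List.foldl_append]
    by_cases h1 : ((PySem.Str.strip line).toList.isEmpty || PySem.Str.startswith (PySem.Str.strip line) "#") = true
    · rw [show pvStepA (arr, arr) line = (arr, arr) from by unfold pvStepA; rw [if_pos h1]]
      rw [show pvCollStep [] line = [] from by unfold pvCollStep; rw [if_pos h1]]
      simpa using ih arr
    · by_cases h2 : ((PySem.Str.strip line).toList.any PySem.Str.isspace) = true
      · rw [show pvStepA (arr, arr) line = (arr, arr) from by
          simp only [pvStepA, if_neg h1, if_pos h2]]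
        rw [show pvCollStep [] line = [] from by
          simp only [pvCollStep, if_neg h1, if_pos h2]]
        simpa using ih arr
      · rw [show pvCollStep [] line = [PySem.Str.strip line] from by
          simp only [pvCollStep, if_neg h1, if_neg h2]; simp]
        simp only [pvStepA, if_neg h1, if_neg h2]
        by_cases h3 : PySem.Set.contains arr (PySem.Str.strip line) = true
        · rw [if_pos h3]
          have hadd : PySem.Set.add arr (PySem.Str.strip line) = arr := by
            unfold PySem.Set.add; rw [if_pos h3]
          simp only [List.foldl_cons, List.foldl_nil, hadd]
          exact ih arr
        · rw [if_neg h3]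
          have hadd : PySem.Set.add arr (PySem.Str.strip line) = arr ++ [PySem.Str.strip line] := by
            unfold PySem.Set.add; rw [if_neg h3]
          simp only [List.foldl_cons, List.foldl_nil, hadd]
          exact ih (arr ++ [PySem.Str.strip line])

-- under Pre_, the collected tokens are exactly B's filter of the stripped lines
theorem pvColl_eq_filter (lines : List String)
    (hp : Pre_parse_address_lines lines) :
    lines.foldl pvCollStep [] =
      (lines.map PySem.Str.strip).filter
        (fun s => !s.toList.isEmpty && !PySem.Str.startswith s "#") := by
  induction lines with
  | nil => rfl
  | cons line rest ih =>
    unfold Pre_parse_address_lines at hp ih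
    simp only [List.all_cons, Bool.and_eq_true] at hp
    obtain ⟨hline, hrest⟩ := hp
    simp only [List.foldl_cons, List.map_cons]
    rw [pvCollStep_from rest (pvCollStep [] line), ih hrest]
    by_cases h1 : ((PySem.Str.strip line).toList.isEmpty || PySem.Str.startswith (PySem.Str.strip line) "#") = true
    · have hcond : (!(PySem.Str.strip line).toList.isEmpty && !PySem.Str.startswith (PySem.Str.strip line) "#") = false := by
        rcases Bool.or_eq_true_iff.mp h1 with h | h <;>
          simp only [h, Bool.not_true, Bool.and_false, Bool.false_and]
      rw [show pvCollStep [] line = [] from by unfold pvCollStep; rw [if_pos h1]]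
      rw [List.filter_cons, hcond]
      simp
    · have h1' := h1
      simp only [Bool.or_eq_true, not_or, Bool.not_eq_true] at h1'
      have h2 : ((PySem.Str.strip line).toList.any PySem.Str.isspace) = false := by
        simp only [Bool.or_eq_true, h1'.1, h1'.2, Bool.false_eq_true, false_or,
          Bool.not_eq_true'] at hline
        exact hline
      rw [show pvCollStep [] line = [PySem.Str.strip line] from by
        simp only [pvCollStep, if_neg h1, h2, Bool.false_eq_true, if_false, List.nil_append]]
      have hcond : (!(PySem.Str.strip line).toList.isEmpty && !PySem.Str.startswith (PySem.Str.strip line) "#") = true := by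
        simp only [h1'.1, h1'.2, Bool.not_false, Bool.and_self]
      rw [List.filter_cons, hcond]
      simp

theorem pvDedupFirst_nil : pvDedupFirst [] = [] := by simp only [pvDedupFirst]

theorem pvDedupFirst_cons (h : String) (t : List String) :
    pvDedupFirst (h :: t) = h :: pvDedupFirst (t.filter (fun x => x != h)) := by
  simp only [pvDedupFirst]

-- the order-preserving set-fold equals the head-keep/filter-out dedup on the unseen part
theorem pvSetFold (ts arr : List String) :
    List.foldl PySem.Set.add arr ts =
      arr ++ pvDedupFirst (ts.filter (fun t => !(arr.contains t))) := by
  induction ts generalizing arr with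
  | nil => simp [pvDedupFirst_nil]
  | cons h t ih =>
    simp only [List.foldl_cons]
    by_cases hcb : arr.contains h = true
    · have hc : h ∈ arr := by simpa using hcb
      rw [PySem.Set.add_of_mem hc,
        show List.filter (fun x => !(arr.contains x)) (h :: t) =
            List.filter (fun x => !(arr.contains x)) t from by
          rw [List.filter_cons]
          simp only [hcb, Bool.not_true, Bool.false_eq_true, if_false]]
      exact ih arr
    · have hc : h ∉ arr := fun hm => hcb (by simpa using hm)
      have hcb' : arr.contains h = false := by simpa using hcb
      rw [PySem.Set.add_of_not_mem hc, ih (arr ++ [h]),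
        show List.filter (fun x => !(arr.contains x)) (h :: t) =
            h :: List.filter (fun x => !(arr.contains x)) t from by
          rw [List.filter_cons]
          simp only [hcb', Bool.not_false]
          rfl]
      rw [pvDedupFirst_cons, List.filter_filter]
      have hfe : List.filter (fun x => !((arr ++ [h]).contains x)) t =
          List.filter (fun x => (x != h) && !(arr.contains x)) t := by
        apply List.filter_congr
        intro x _
        by_cases hx : x = h <;> by_cases hxa : x ∈ arr <;> simp [hx, hxa]
      rw [hfe]
      simp

-- ===== VERDICT (by name: the statement is the Claim_ definition above) =====
theorem parse_address_lines_spec : Claim_equal_parse_address_lines := by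
  intro lines _ hp
  unfold Spec_parse_address_lines parse_address_lines parse_address_lines_alt
  rw [show PySem.Set.empty = ([] : List String) from rfl]
  rw [pvKey lines [], pvColl_eq_filter lines hp, pvSetFold]
  simp
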